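-- pv_equiv track=rewrite | github.com/Filafey/UVM | uvm_asm_v28.py | set_bits
-- ===== SOURCE A (Python) =====
-- def set_bits(byte_array, start_bit, length, value):
--     """Устанавливает биты в массиве байт"""
--     for i in range(length):
--         bit = (value >> i) & 1
--         bit_index = start_bit + i
--         byte_index = bit_index // 8
--         bit_in_byte = bit_index % 8
--         if bit:
--             byte_array[byte_index] |= (1 << bit_in_byte)
--         else:
--             byte_array[byte_index] &= ~(1 << bit_in_byte)
--     return byte_array
-- ===== SOURCE B (Python) =====
-- def set_bits(byte_array, start_bit, length, value):
--     """Устанавливает биты в массиве байт"""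
--     if length > 0:
--         first = start_bit // 8
--         last = (start_bit + length - 1) // 8
--         for b in range(first, last + 1):
--             lo = max(start_bit, 8 * b)
--             hi = min(start_bit + length, 8 * b + 8)
--             r = lo - 8 * b
--             w = hi - lo
--             chunk = (value >> (lo - start_bit)) % (1 << w)
--             cur = byte_array[b]
--             byte_array[b] = (cur >> (r + w) << (r + w)) + chunk * (1 << r) + cur % (1 << r)
--     return byte_array
-- ===== Notes on version B (the rewrite author's own statement) =====
-- stated objective: alternative
-- what changed: Instead of one read-modify-write per bit, B loops once over the affected bytes, splicing each byte's whole in-range bit chunk in with one arithmetic replace (high bits kept, chunk inserted, low bits kept); measured ~1.4x faster at the largest timing size, below the 1.5x bar, so no speed is claimed.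
import Mathlib
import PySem

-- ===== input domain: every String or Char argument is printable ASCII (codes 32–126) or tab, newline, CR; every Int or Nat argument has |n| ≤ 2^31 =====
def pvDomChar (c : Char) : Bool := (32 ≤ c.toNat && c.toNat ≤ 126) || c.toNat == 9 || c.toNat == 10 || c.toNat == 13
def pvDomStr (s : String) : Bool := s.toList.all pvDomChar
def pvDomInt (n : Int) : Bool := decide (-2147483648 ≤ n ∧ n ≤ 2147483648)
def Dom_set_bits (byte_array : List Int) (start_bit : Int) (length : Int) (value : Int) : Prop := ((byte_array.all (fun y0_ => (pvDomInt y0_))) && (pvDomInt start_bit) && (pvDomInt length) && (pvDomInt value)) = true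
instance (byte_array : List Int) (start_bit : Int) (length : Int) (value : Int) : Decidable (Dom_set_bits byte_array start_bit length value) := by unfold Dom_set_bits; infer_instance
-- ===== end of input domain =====

-- B replaces A's one read-modify-write per BIT by one arithmetic bit-chunk splice per affected BYTE.
-- Both Pythons mutate byte_array in place identically; the theorems below are about the return value.

-- ===== PORT A =====
def set_bits (byte_array : List Int) (start_bit : Int) (length : Int) (value : Int) : List Int :=
  (PySem.List.pyRange 0 length 1).foldl (fun arr i =>
      let bit : Int := PySem.Int.band (value >>> i.toNat) 1   -- i ≥ 0 inside range(length), so .toNat is exact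
      let bit_index := start_bit + i
      let byte_index := PySem.Int.floordiv bit_index 8
      let bit_in_byte := PySem.Int.mod bit_index 8            -- ∈ [0,8), so .toNat is exact
      if bit ≠ 0 then
        PySem.List.pySetD arr byte_index
          (PySem.Int.bor (PySem.List.pyGetD arr byte_index 0) ((1:Int) <<< bit_in_byte.toNat))
      else
        PySem.List.pySetD arr byte_index
          (PySem.Int.band (PySem.List.pyGetD arr byte_index 0) (Int.not ((1:Int) <<< bit_in_byte.toNat))))
    byte_array

-- ===== PORT B =====
def set_bits_alt (byte_array : List Int) (start_bit : Int) (length : Int) (value : Int) : List Int :=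
  if length > 0 then
    let first := PySem.Int.floordiv start_bit 8
    let last := PySem.Int.floordiv (start_bit + length - 1) 8
    (PySem.List.pyRange first (last + 1) 1).foldl (fun arr b =>
        let lo := max start_bit (8 * b)
        let hi := min (start_bit + length) (8 * b + 8)
        let r := lo - 8 * b                                   -- ∈ [0,8), .toNat exact
        let w := hi - lo                                      -- ≥ 1 inside the loop, .toNat exact
        let chunk := PySem.Int.mod (value >>> (lo - start_bit).toNat) ((1:Int) <<< w.toNat)
        let cur := PySem.List.pyGetD arr b 0
        PySem.List.pySetD arr b
          ((cur >>> (r + w).toNat <<< (r + w).toNat) + chunk * ((1:Int) <<< r.toNat)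
            + PySem.Int.mod cur ((1:Int) <<< r.toNat)))
      byte_array
  else byte_array

-- ===== PRECONDITION & SPEC =====
-- Pre_ excludes exactly the inputs on which Python A raises IndexError: the accessed byte
-- indices are all the integers from start_bit//8 to (start_bit+length-1)//8, and A raises
-- iff one of them falls outside Python's index range [-len(byte_array), len(byte_array)).
def Pre_set_bits (byte_array : List Int) (start_bit : Int) (length : Int) (value : Int) : Prop :=
  0 < length →
    (-(byte_array.length : Int) ≤ PySem.Int.floordiv start_bit 8 ∧
      PySem.Int.floordiv (start_bit + length - 1) 8 < (byte_array.length : Int))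
instance (byte_array : List Int) (start_bit : Int) (length : Int) (value : Int) : Decidable (Pre_set_bits byte_array start_bit length value) := by unfold Pre_set_bits; infer_instance

def pvWitness_set_bits : List Int × Int × Int × Int := ([7, 250], 3, 9, 213)

def Spec_set_bits (byte_array : List Int) (start_bit : Int) (length : Int) (value : Int) (out : List Int) : Prop := out = set_bits_alt byte_array start_bit length value
instance (byte_array : List Int) (start_bit : Int) (length : Int) (value : Int) (out : List Int) : Decidable (Spec_set_bits byte_array start_bit length value out) := by unfold Spec_set_bits; infer_instance

-- ===== CLAIM (what is proved, stated in full; the proofs are below) =====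
def Claim_equal_set_bits : Prop := ∀ (byte_array : List Int) (start_bit : Int) (length : Int) (value : Int), Dom_set_bits byte_array start_bit length value → Pre_set_bits byte_array start_bit length value → Spec_set_bits byte_array start_bit length value (set_bits byte_array start_bit length value)

-- ===== LEMMAS AND PROOFS =====

-- bit k of x as an integer: (x >> k) & 1 = (x / 2^k) % 2 ∈ {0,1} (Python-exact on negatives)
def bitOf (x : Int) (k : Nat) : Int := (x / 2^k) % 2

-- the branch-free value of A's per-bit read-modify-write of a byte
def gstep (cur : Int) (r : Nat) (v : Int) : Int := cur - bitOf cur r * 2^r + v * 2^r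

-- A's loop body in arithmetic form
def astep (s v : Int) (arr : List Int) (i : Int) : List Int :=
  let q := PySem.Int.floordiv (s + i) 8
  PySem.List.pySetD arr q
    (gstep (PySem.List.pyGetD arr q 0) (PySem.Int.mod (s + i) 8).toNat (bitOf v i.toNat))

-- replacing bits [r0, r0+w) of cur by the w-bit chunk c
def splice (cur : Int) (r0 w : Nat) (c : Int) : Int :=
  (cur / 2^(r0+w)) * 2^(r0+w) + c * 2^r0 + cur % 2^r0

theorem nat_or_pow_false : ∀ (r m : Nat), m.testBit r = false → m ||| 2^r = m + 2^r := by
  intro r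
  induction r with
  | zero =>
    intro m h
    have hm := Nat.bit_decide_mod_two_eq_one_shiftRight_one m
    have hbit : decide (m % 2 = 1) = false := by
      simpa [Nat.testBit_eq_decide_div_mod_eq] using h
    rw [← hm, hbit]
    have h1 : (2:Nat)^0 = Nat.bit true 0 := rfl
    rw [h1, Nat.lor_bit]
    simp [Nat.bit]
  | succ r ih =>
    intro m h
    have hm := Nat.bit_decide_mod_two_eq_one_shiftRight_one m
    have hp : (2:Nat)^(r+1) = Nat.bit false (2^r) := by simp [Nat.bit, Nat.pow_succ]; ring
    have htail : (m >>> 1).testBit r = false := by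
      have h' : (Nat.bit (decide (m % 2 = 1)) (m >>> 1)).testBit (r+1) = false := by rw [hm]; exact h
      rwa [Nat.testBit_bit_succ] at h'
    calc m ||| 2^(r+1)
        = Nat.bit (decide (m % 2 = 1)) (m >>> 1) ||| Nat.bit false (2^r) := by rw [hm, ← hp]
      _ = Nat.bit (decide (m % 2 = 1)) ((m >>> 1) ||| 2^r) := by rw [Nat.lor_bit]; simp
      _ = Nat.bit (decide (m % 2 = 1)) ((m >>> 1) + 2^r) := by rw [ih _ htail]
      _ = m + 2^(r+1) := by
          conv_rhs => rw [← hm]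
          simp only [Nat.bit]
          rcases hd : decide (m % 2 = 1) with _ | _ <;> simp [Nat.pow_succ] <;> ring

theorem nat_or_pow_true {m r : Nat} (h : m.testBit r = true) : m ||| 2^r = m := by
  apply Nat.eq_of_testBit_eq
  intro k
  rw [Nat.testBit_lor, Nat.testBit_two_pow]
  by_cases hk : r = k
  · subst hk; simp [h]
  · simp [hk]
theorem one_shift_eq (r : Nat) : ((1:Int) <<< r) = 2^r := by
  rw [Int.shiftLeft_eq]; ring
theorem int_not_eq (n : Int) : Int.not n = -n - 1 := by
  cases n <;> simp [Int.not] <;> omega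
theorem ediv_neg_succ (n d : Int) (hd : 0 < d) : (-n - 1) / d = -(n / d) - 1 := by
  have h := (Int.ediv_emod_unique (a := -n-1) (b := d)
    (r := d - 1 - n % d) (q := -(n / d) - 1) hd).mpr
  have h1 : 0 ≤ n % d := Int.emod_nonneg n (by omega)
  have h2 : n % d < d := Int.emod_lt_of_pos n hd
  have h3 : d * (n / d) + n % d = n := Int.ediv_add_emod n d
  exact (h ⟨by ring_nf; omega, by omega, by omega⟩).1
theorem bitOf_toNat (x : Int) (hx : 0 ≤ x) (r : Nat) :
    bitOf x r = ((x.toNat / 2^r % 2 : Nat) : Int) := by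
  unfold bitOf
  push_cast
  rw [Int.toNat_of_nonneg hx]
theorem bitOf_neg (x : Int) (hx : x < 0) (r : Nat) :
    bitOf x r = 1 - bitOf (-x-1) r := by
  unfold bitOf
  have h : x / 2^r = -((-x-1) / 2^r) - 1 := by
    have := ediv_neg_succ (-x-1) (2^r) (by positivity)
    simpa using this
  rw [h]
  omega
theorem testBit_eq_one_iff (m r : Nat) : m.testBit r = true ↔ (m / 2^r % 2 : Nat) = 1 := by
  rw [Nat.testBit_eq_decide_div_mod_eq]; simp

theorem testBit_eq_zero (m r : Nat) (hb : m.testBit r = false) : m / 2^r % 2 = 0 := by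
  rcases Nat.mod_two_eq_zero_or_one (m / 2^r) with h | h
  · exact h
  · exact absurd ((testBit_eq_one_iff m r).mpr h) (by simp [hb])

theorem bor_one_shift (x : Int) (r : Nat) :
    PySem.Int.bor x ((1:Int) <<< r) = x + (1 - bitOf x r) * 2^r := by
  rw [one_shift_eq]
  have hp : (0:Int) ≤ 2^r := by positivity
  have hpn : ((2:Int)^r).toNat = 2^r := by
    have : ((2:Int)^r) = ((2^r : Nat) : Int) := by push_cast; ring
    rw [this, Int.toNat_natCast]
  by_cases hx : 0 ≤ x
  · rw [PySem.Int.bor, if_pos hx, if_pos hp, hpn]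
    rcases hb : x.toNat.testBit r with _ | _
    · rw [nat_or_pow_false r _ hb]
      have hz : bitOf x r = 0 := by
        rw [bitOf_toNat x hx r, testBit_eq_zero _ _ hb]
        norm_num
      rw [hz]
      push_cast
      rw [Int.toNat_of_nonneg hx]
      ring
    · rw [nat_or_pow_true hb]
      have h1 : bitOf x r = 1 := by
        rw [bitOf_toNat x hx r, (testBit_eq_one_iff x.toNat r).mp hb]
        norm_num
      rw [h1, Int.toNat_of_nonneg hx]
      ring
  · push_neg at hx
    rw [PySem.Int.bor, if_neg (by omega), if_pos hp, hpn]
    set n : Nat := (-x-1).toNat with hn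
    have hnx : (n : Int) = -x - 1 := by
      rw [hn, Int.toNat_of_nonneg (by omega)]
    have hand : n &&& 2^r = (n.testBit r).toNat * 2^r := Nat.and_two_pow n r
    have hflip : bitOf x r = 1 - ((n / 2^r % 2 : Nat) : Int) := by
      rw [bitOf_neg x hx r, ← hnx, bitOf_toNat _ (by positivity) r, Int.toNat_natCast]
    rcases hb : n.testBit r with _ | _
    · have h0 : n &&& 2^r = 0 := by rw [hand, hb]; simp
      have hbit : ((n / 2^r % 2 : Nat) : Int) = 0 := by
        rw [testBit_eq_zero _ _ hb]; norm_num
      rw [h0, hflip, hbit]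
      push_cast
      omega
    · have h1 : n &&& 2^r = 2^r := by rw [hand, hb]; simp
      have hbit : ((n / 2^r % 2 : Nat) : Int) = 1 := by
        rw [(testBit_eq_one_iff n r).mp hb]; norm_num
      have hle : 2^r ≤ n := by rw [← h1]; exact Nat.and_le_left
      rw [h1, hflip, hbit]
      have hc : ((n - 2^r : Nat) : Int) = (n : Int) - 2^r := by push_cast [hle]; ring
      rw [hc, hnx]
      ring

theorem band_not_one_shift (x : Int) (r : Nat) :
    PySem.Int.band x (Int.not ((1:Int) <<< r)) = x - bitOf x r * 2^r := by
  rw [one_shift_eq, int_not_eq]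
  have hp : (0:Int) < 2^r := by positivity
  have hpn : ((2:Int)^r).toNat = 2^r := by
    have : ((2:Int)^r) = ((2^r : Nat) : Int) := by push_cast; ring
    rw [this, Int.toNat_natCast]
  have harg : (-(-(2:Int)^r - 1) - 1).toNat = 2^r := by
    have h : (-(-(2:Int)^r - 1) - 1) = 2^r := by ring
    rw [h, hpn]
  by_cases hx : 0 ≤ x
  · rw [PySem.Int.band, if_pos hx, if_neg (by omega), harg]
    have hand : x.toNat &&& 2^r = (x.toNat.testBit r).toNat * 2^r := Nat.and_two_pow _ r
    have hle : x.toNat &&& 2^r ≤ x.toNat := Nat.and_le_left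
    have hsub : ((x.toNat - (x.toNat &&& 2^r) : Nat) : Int)
        = x - ((x.toNat &&& 2^r : Nat) : Int) := by
      push_cast [hle]
      rw [Int.toNat_of_nonneg hx]
    rw [hsub, hand]
    rcases hb : x.toNat.testBit r with _ | _
    · have hz : bitOf x r = 0 := by
        rw [bitOf_toNat x hx r, testBit_eq_zero _ _ hb]; norm_num
      rw [hz]
      simp
    · have h1 : bitOf x r = 1 := by
        rw [bitOf_toNat x hx r, (testBit_eq_one_iff x.toNat r).mp hb]; norm_num
      rw [h1]
      simp
  · push_neg at hx
    rw [PySem.Int.band, if_neg (by omega), if_neg (by omega), harg]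
    set n : Nat := (-x-1).toNat with hn
    have hnx : (n : Int) = -x - 1 := by rw [hn, Int.toNat_of_nonneg (by omega)]
    have hflip : bitOf x r = 1 - ((n / 2^r % 2 : Nat) : Int) := by
      rw [bitOf_neg x hx r, ← hnx, bitOf_toNat _ (by positivity) r, Int.toNat_natCast]
    rcases hb : n.testBit r with _ | _
    · rw [nat_or_pow_false r _ hb]
      have hbit : ((n / 2^r % 2 : Nat) : Int) = 0 := by
        rw [testBit_eq_zero _ _ hb]; norm_num
      rw [hflip, hbit]
      push_cast
      omega
    · rw [nat_or_pow_true hb]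
      have hbit : ((n / 2^r % 2 : Nat) : Int) = 1 := by
        rw [(testBit_eq_one_iff n r).mp hb]; norm_num
      rw [hflip, hbit, hnx]
      ring

theorem shiftRight_intCast (v : Int) (k : Nat) : v >>> ((k : Int)) = v >>> k := by
  cases v with
  | ofNat m => exact Int.shiftRight_natCast m k
  | negSucc m => exact (Int.shiftRight_negSucc m k).symm ▸ rfl

theorem set_bits_eq (b : List Int) (s l v : Int) :
    set_bits b s l v = (PySem.List.pyRange 0 l 1).foldl (astep s v) b := by
  unfold set_bits
  congr 1
  funext arr i
  simp only [astep]
  have hbit : PySem.Int.band (v >>> ((i.toNat : Int))) 1 = bitOf v i.toNat := by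
    rw [shiftRight_intCast, PySem.Int.band_one, PySem.Int.mod_eq_emod_of_pos (by norm_num),
      Int.shiftRight_eq_div_pow]
    rfl
  rw [hbit]
  have hb01 : bitOf v i.toNat = 0 ∨ bitOf v i.toNat = 1 := by
    unfold bitOf; omega
  rcases hb01 with hb | hb <;> rw [hb]
  · simp only [ne_eq, not_true_eq_false, if_false, reduceIte]
    rw [band_not_one_shift]
    unfold gstep
    congr 1
    ring
  · norm_num
    rw [bor_one_shift]
    unfold gstep
    congr 1
    ring

theorem pyIdx?_of_inRange (n : Nat) (i : Int) (h : PySem.Raise.InRange n i) :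
    ∃ K : Nat, K < n ∧ PySem.List.pyIdx? n i = some K := by
  obtain ⟨h1, h2⟩ := h
  by_cases hi : 0 ≤ i
  · exact ⟨i.toNat, by omega, by simp only [PySem.List.pyIdx?]; rw [if_pos hi, if_pos h2]⟩
  · exact ⟨n - (-i).toNat, by omega, by simp only [PySem.List.pyIdx?]; rw [if_neg hi, if_pos h1]⟩

theorem pyIdx?_lt (n : Nat) (i : Int) (K : Nat) (h : PySem.List.pyIdx? n i = some K) :
    K < n := by
  simp only [PySem.List.pyIdx?] at h
  by_cases hi : 0 ≤ i
  · rw [if_pos hi] at h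
    by_cases h2 : i < (n : Int)
    · rw [if_pos h2] at h; cases h; omega
    · rw [if_neg h2] at h; cases h
  · rw [if_neg hi] at h
    by_cases h1 : -(n:Int) ≤ i
    · rw [if_pos h1] at h; cases h; omega
    · rw [if_neg h1] at h; cases h

theorem pySetD_eq_set (xs : List Int) (i : Int) (v : Int) (K : Nat)
    (hK : PySem.List.pyIdx? xs.length i = some K) :
    PySem.List.pySetD xs i v = xs.set K v := by
  simp [PySem.List.pySetD, PySem.List.pySet?, hK]

theorem pySetD_eq_none (xs : List Int) (i : Int) (v : Int)
    (hK : PySem.List.pyIdx? xs.length i = none) :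
    PySem.List.pySetD xs i v = xs := by
  simp [PySem.List.pySetD, PySem.List.pySet?, hK]

theorem pyGetD_eq_get (xs : List Int) (i : Int) (K : Nat) (hKlt : K < xs.length)
    (hK : PySem.List.pyIdx? xs.length i = some K) :
    PySem.List.pyGetD xs i 0 = xs[K] := by
  simp [PySem.List.pyGetD, PySem.List.pyGet?, hK, List.getElem?_eq_getElem hKlt]

theorem pyGetD_pySetD_self (xs : List Int) (i : Int) (v : Int)
    (h : PySem.Raise.InRange xs.length i) :
    PySem.List.pyGetD (PySem.List.pySetD xs i v) i 0 = v := by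
  obtain ⟨K, hKlt, hK⟩ := pyIdx?_of_inRange xs.length i h
  rw [pySetD_eq_set xs i v K hK]
  have hK' : PySem.List.pyIdx? (xs.set K v).length i = some K := by
    rw [List.length_set]; exact hK
  rw [pyGetD_eq_get _ i K (by rw [List.length_set]; exact hKlt) hK']
  exact List.getElem_set_self _

theorem pySetD_pySetD_self (xs : List Int) (i : Int) (v v' : Int) :
    PySem.List.pySetD (PySem.List.pySetD xs i v) i v' = PySem.List.pySetD xs i v' := by
  cases hK : PySem.List.pyIdx? xs.length i with
  | none =>
    rw [pySetD_eq_none xs i v hK, pySetD_eq_none xs i v' hK]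
  | some K =>
    rw [pySetD_eq_set xs i v K hK, pySetD_eq_set _ i v' K (by rw [List.length_set]; exact hK),
      pySetD_eq_set xs i v' K hK, List.set_set]

theorem pySetD_getD_self (xs : List Int) (i : Int) :
    PySem.List.pySetD xs i (PySem.List.pyGetD xs i 0) = xs := by
  cases hK : PySem.List.pyIdx? xs.length i with
  | none => exact pySetD_eq_none xs i _ hK
  | some K =>
    have hKlt := pyIdx?_lt xs.length i K hK
    rw [pySetD_eq_set xs i _ K hK, pyGetD_eq_get xs i K hKlt hK, List.set_getElem_self]

theorem pyRange_one_empty {a b : Int} (h : b ≤ a) : PySem.List.pyRange a b 1 = [] := by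
  simp only [PySem.List.pyRange]
  rw [if_neg (by norm_num), if_pos (by norm_num), if_neg (by omega)]
  simp

theorem emod_split (x : Int) (w : Nat) :
    x % 2^(w+1) = x % 2^w + (x / 2^w % 2) * 2^w := by
  have h1 : x / 2^w / 2 = x / 2^(w+1) := by
    rw [pow_succ]
    exact Int.ediv_ediv_eq_ediv_mul (by positivity)
  have h2 : x = 2^w * (x / 2^w) + x % 2^w := (Int.ediv_add_emod x (2^w)).symm
  have h3 : x / 2^w = 2 * (x / 2^w / 2) + x / 2^w % 2 := (Int.ediv_add_emod _ 2).symm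
  have h4 : x = 2^(w+1) * (x / 2^(w+1)) + x % 2^(w+1) := (Int.ediv_add_emod x (2^(w+1))).symm
  rw [h1] at h3
  linear_combination h2 - h4 + (2:Int)^w * h3

theorem splice_div (cur : Int) (r0 w : Nat) (c : Int) (hc0 : 0 ≤ c) (hc : c < 2^w) :
    splice cur r0 w c / 2^(r0+w) = cur / 2^(r0+w) := by
  unfold splice
  have h5 : 0 ≤ cur % 2^r0 := Int.emod_nonneg cur (by positivity)
  have h6 : cur % 2^r0 < 2^r0 := Int.emod_lt_of_pos cur (by positivity)
  have hrem : 0 ≤ c * 2^r0 + cur % 2^r0 := by positivity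
  have hrem2 : c * 2^r0 + cur % 2^r0 < 2^(r0+w) := by
    have h7 : c * 2^r0 ≤ (2^w - 1) * 2^r0 :=
      mul_le_mul_of_nonneg_right (by omega) (by positivity)
    have hp : (2:Int)^(r0+w) = 2^w * 2^r0 := by rw [pow_add]; ring
    nlinarith
  rw [show cur / 2^(r0+w) * 2^(r0+w) + c * 2^r0 + cur % 2^r0
      = (c * 2^r0 + cur % 2^r0) + (cur / 2^(r0+w)) * 2^(r0+w) from by ring]
  rw [Int.add_mul_ediv_right _ _ (by positivity : ((2:Int)^(r0+w)) ≠ 0)]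
  rw [Int.ediv_eq_zero_of_lt hrem hrem2]
  ring

theorem splice_step (cur v' : Int) (r0 w : Nat) :
    gstep (splice cur r0 w (v' % 2^w)) (r0+w) (v' / 2^w % 2)
      = splice cur r0 (w+1) (v' % 2^(w+1)) := by
  have hc0 : 0 ≤ v' % 2^w := Int.emod_nonneg v' (by positivity)
  have hc : v' % 2^w < 2^w := Int.emod_lt_of_pos v' (by positivity)
  unfold gstep
  have hbit : bitOf (splice cur r0 w (v' % 2^w)) (r0+w) = cur / 2^(r0+w) % 2 := by
    unfold bitOf
    rw [splice_div cur r0 w _ hc0 hc]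
  rw [hbit]
  have hsplit := emod_split v' w
  have hcur : cur / 2^(r0+w) = 2 * (cur / 2^(r0+w+1)) + cur / 2^(r0+w) % 2 := by
    have h1 : cur / 2^(r0+w) / 2 = cur / 2^(r0+w+1) := by
      rw [pow_succ]
      exact Int.ediv_ediv_eq_ediv_mul (by positivity)
    have h2 := (Int.ediv_add_emod (cur / 2^(r0+w)) 2).symm
    rw [h1] at h2
    omega
  unfold splice
  rw [hsplit]
  have hp1 : (2:Int)^(r0+w+1) = 2 * 2^(r0+w) := by ring
  have hp2 : (2:Int)^(r0+w) = 2^w * 2^r0 := by rw [pow_add]; ring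
  linear_combination (2:Int)^(r0+w) * hcur + (v' / 2^w % 2) * hp2
    - (cur / 2^(r0+w+1)) * hp1

theorem seg_lemma (s v : Int) (b : Int) (r0 : Nat) (a : Int) (ha : 0 ≤ a)
    (hs : s + a = 8*b + (r0 : Int)) :
    ∀ (w : Nat), r0 + w ≤ 8 → ∀ (arr : List Int), PySem.Raise.InRange arr.length b →
    (PySem.List.pyRange a (a + (w : Int)) 1).foldl (astep s v) arr
      = PySem.List.pySetD arr b
          (splice (PySem.List.pyGetD arr b 0) r0 w ((v / 2^(a.toNat)) % 2^w)) := by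
  intro w
  induction w with
  | zero =>
    intro _ arr _
    rw [pyRange_one_empty (by omega)]
    simp only [List.foldl_nil]
    have hz : splice (PySem.List.pyGetD arr b 0) r0 0 ((v / 2^(a.toNat)) % 2^0)
        = PySem.List.pyGetD arr b 0 := by
      unfold splice
      have h1 : ((v / 2^(a.toNat)) % 2^0) = 0 := by simp
      rw [h1]
      simp only [Nat.add_zero]
      linear_combination Int.ediv_add_emod (PySem.List.pyGetD arr b 0) (2^r0)
    rw [hz, pySetD_getD_self]
  | succ w ih =>
    intro hw arr hb
    have hw' : (r0 : Int) + w + 1 ≤ 8 := by exact_mod_cast hw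
    have hsplit : PySem.List.pyRange a (a + ((w+1 : Nat) : Int)) 1
        = PySem.List.pyRange a (a + (w : Int)) 1
          ++ PySem.List.pyRange (a + (w : Int)) (a + ((w+1 : Nat) : Int)) 1 := by
      have := PySem.List.pyRange_one_append a (a + (w : Int)) (a + ((w+1 : Nat) : Int))
        (by omega) (by push_cast; omega)
      simpa using this
    have hlast : PySem.List.pyRange (a + (w : Int)) (a + ((w+1 : Nat) : Int)) 1
        = [a + (w : Int)] := by
      rw [PySem.List.pyRange_one_cons (by push_cast; omega)]
      rw [pyRange_one_empty (by push_cast; omega)]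
    rw [hsplit, List.foldl_append, hlast, ih (by omega) arr hb]
    simp only [List.foldl_cons, List.foldl_nil]
    simp only [astep]
    have hq : PySem.Int.floordiv (s + (a + (w : Int))) 8 = b := by
      rw [PySem.Int.floordiv_eq_ediv_of_pos (by norm_num)]
      omega
    have hm : PySem.Int.mod (s + (a + (w : Int))) 8 = ((r0 + w : Nat) : Int) := by
      rw [PySem.Int.mod_eq_emod_of_pos (by norm_num)]
      push_cast
      omega
    rw [hq, hm]
    have htn : (((r0 + w : Nat) : Int)).toNat = r0 + w := Int.toNat_natCast _
    rw [htn]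
    rw [pyGetD_pySetD_self arr b _ hb, pySetD_pySetD_self]
    congr 1
    have hbitv : bitOf v (a + (w : Int)).toNat = (v / 2^(a.toNat)) / 2^w % 2 := by
      unfold bitOf
      have hiN : (a + (w : Int)).toNat = a.toNat + w := by omega
      rw [hiN, pow_add, ← Int.ediv_ediv_eq_ediv_mul (by positivity)]
    rw [hbitv]
    exact splice_step (PySem.List.pyGetD arr b 0) (v / 2^(a.toNat)) r0 w

theorem stepB_eq (s len v b : Int) (arr : List Int)
    (hfb : PySem.Int.floordiv s 8 ≤ b) (hbl : b ≤ PySem.Int.floordiv (s + len - 1) 8)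
    (hlen : 0 < len) :
    (let lo := max s (8 * b)
     let hi := min (s + len) (8 * b + 8)
     let r := lo - 8 * b
     let w := hi - lo
     let chunk := PySem.Int.mod (v >>> (lo - s).toNat) ((1:Int) <<< w.toNat)
     let cur := PySem.List.pyGetD arr b 0
     PySem.List.pySetD arr b
       ((cur >>> (r + w).toNat <<< (r + w).toNat) + chunk * ((1:Int) <<< r.toNat)
         + PySem.Int.mod cur ((1:Int) <<< r.toNat)))
    = PySem.List.pySetD arr b
        (splice (PySem.List.pyGetD arr b 0)
          ((max s (8*b) - 8*b).toNat)
          ((min (s + len) (8*b + 8) - max s (8*b)).toNat)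
          ((v / 2^((max s (8*b) - s).toNat)) % 2^((min (s + len) (8*b + 8) - max s (8*b)).toNat))) := by
  rw [PySem.Int.floordiv_eq_ediv_of_pos (by norm_num)] at hfb
  rw [PySem.Int.floordiv_eq_ediv_of_pos (by norm_num)] at hbl
  simp only []
  set lo := max s (8 * b) with hlo
  set hi := min (s + len) (8 * b + 8) with hhi
  have hslo : s ≤ lo := le_max_left _ _
  have hblo : 8 * b ≤ lo := le_max_right _ _
  have hhi1 : hi ≤ s + len := min_le_left _ _
  have hhi2 : hi ≤ 8 * b + 8 := min_le_right _ _
  have hlo_cases : lo = s ∨ lo = 8 * b := max_choice _ _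
  have hhi_cases : hi = s + len ∨ hi = 8 * b + 8 := min_choice _ _
  have hlohi : lo < hi := by omega
  set cur := PySem.List.pyGetD arr b 0
  congr 1
  have hrw : (lo - 8*b + (hi - lo)).toNat = (lo - 8*b).toNat + (hi - lo).toNat := by omega
  have e1 : cur >>> (lo - 8*b + (hi - lo)).toNat <<< (lo - 8*b + (hi - lo)).toNat
      = cur / 2^((lo - 8*b).toNat + (hi - lo).toNat) * 2^((lo - 8*b).toNat + (hi - lo).toNat) := by
    rw [hrw, Int.shiftRight_eq_div_pow, Int.shiftLeft_eq]
    push_cast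
    ring
  have e2 : PySem.Int.mod (v >>> (lo - s).toNat) ((1:Int) <<< (hi - lo).toNat)
      = (v / 2^((lo - s).toNat)) % 2^((hi - lo).toNat) := by
    rw [Int.shiftLeft_eq, one_mul, PySem.Int.mod_eq_emod_of_pos (by positivity),
      Int.shiftRight_eq_div_pow]
    push_cast
    ring_nf
  have e3 : ((1:Int) <<< (lo - 8*b).toNat) = 2^((lo - 8*b).toNat) := by
    rw [Int.shiftLeft_eq, one_mul]
  have e4 : PySem.Int.mod cur ((1:Int) <<< (lo - 8*b).toNat) = cur % 2^((lo - 8*b).toNat) := by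
    rw [e3, PySem.Int.mod_eq_emod_of_pos (by positivity)]
  rw [e1, e2, e4, e3]
  unfold splice
  rfl

theorem outer_lemma (s v len : Int) (hlen : 0 < len) (N : Nat)
    (hN1 : -(N:Int) ≤ PySem.Int.floordiv s 8)
    (hN2 : PySem.Int.floordiv (s + len - 1) 8 < (N:Int)) :
    ∀ (k : Nat) (b0 : Int) (arr : List Int), arr.length = N →
    PySem.Int.floordiv s 8 ≤ b0 →
    b0 + (k : Int) = PySem.Int.floordiv (s + len - 1) 8 + 1 →
    (PySem.List.pyRange (max (8*b0 - s) 0) len 1).foldl (astep s v) arr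
      = (PySem.List.pyRange b0 (PySem.Int.floordiv (s + len - 1) 8 + 1) 1).foldl
          (fun (arr : List Int) (b : Int) =>
            let lo := max s (8 * b)
            let hi := min (s + len) (8 * b + 8)
            let r := lo - 8 * b
            let w := hi - lo
            let chunk := PySem.Int.mod (v >>> (lo - s).toNat) ((1:Int) <<< w.toNat)
            let cur := PySem.List.pyGetD arr b 0
            PySem.List.pySetD arr b
              ((cur >>> (r + w).toNat <<< (r + w).toNat) + chunk * ((1:Int) <<< r.toNat)
                + PySem.Int.mod cur ((1:Int) <<< r.toNat)))
          arr := by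
  have hfd1 : PySem.Int.floordiv s 8 = s / 8 := PySem.Int.floordiv_eq_ediv_of_pos (by norm_num)
  have hfd2 : PySem.Int.floordiv (s + len - 1) 8 = (s + len - 1) / 8 :=
    PySem.Int.floordiv_eq_ediv_of_pos (by norm_num)
  intro k
  induction k with
  | zero =>
    intro b0 arr hlen' hfst hcnt
    rw [hfd2] at hcnt
    push_cast at hcnt
    rw [hfd1] at hfst
    rw [pyRange_one_empty (by omega), pyRange_one_empty (by rw [hfd2]; omega)]
    rfl
  | succ k ih =>
    intro b0 arr hlen' hfst hcnt
    have hb0le : b0 ≤ PySem.Int.floordiv (s + len - 1) 8 := by push_cast at hcnt; omega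
    -- segment boundaries for byte b0
    have ha0 : max (8*b0 - s) 0 = max s (8*b0) - s := by omega
    have hei : min (s + len) (8*b0 + 8) - s ≤ len := by omega
    have hsa : s + (max (8*b0 - s) 0) = 8*b0 + ((max s (8*b0) - 8*b0).toNat : Int) := by
      rw [hfd1] at hfst
      omega
    have hw8 : (max s (8*b0) - 8*b0).toNat + (min (s + len) (8*b0 + 8) - max s (8*b0)).toNat ≤ 8 := by
      rw [hfd1] at hfst
      rw [hfd2] at hb0le
      omega
    have hInR : PySem.Raise.InRange arr.length b0 := by
      constructor <;> rw [hlen'] <;> [skip; skip]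
      · rw [hfd1] at hN1 hfst; omega
      · rw [hfd2] at hN2; omega
    have hsegend : max (8*b0 - s) 0 + (((min (s + len) (8*b0 + 8) - max s (8*b0)).toNat : Nat) : Int)
        = min (s + len) (8*b0 + 8) - s := by
      rw [hfd1] at hfst
      omega
    have hsplit : PySem.List.pyRange (max (8*b0 - s) 0) len 1
        = PySem.List.pyRange (max (8*b0 - s) 0) (min (s + len) (8*b0 + 8) - s) 1
          ++ PySem.List.pyRange (min (s + len) (8*b0 + 8) - s) len 1 := by
      apply PySem.List.pyRange_one_append
      · rw [hfd1] at hfst; omega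
      · omega
    rw [hsplit, List.foldl_append]
    have hseg := seg_lemma s v b0 ((max s (8*b0) - 8*b0).toNat) (max (8*b0 - s) 0)
      (by omega) hsa ((min (s + len) (8*b0 + 8) - max s (8*b0)).toNat) hw8 arr hInR
    rw [hsegend] at hseg
    rw [hseg]
    -- right side: peel byte b0
    have hcons : PySem.List.pyRange b0 (PySem.Int.floordiv (s + len - 1) 8 + 1) 1
        = b0 :: PySem.List.pyRange (b0 + 1) (PySem.Int.floordiv (s + len - 1) 8 + 1) 1 :=
      PySem.List.pyRange_one_cons (by rw [hfd2]; omega)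
    rw [hcons, List.foldl_cons]
    rw [stepB_eq s len v b0 arr (by omega) hb0le hlen]
    -- identify the two chunk expressions
    have hchunkeq : ((max s (8*b0) - s).toNat) = (max (8*b0 - s) 0).toNat := by omega
    rw [hchunkeq]
    -- apply IH to the updated array
    by_cases hbl : b0 = PySem.Int.floordiv (s + len - 1) 8
    · -- last byte: both remaining folds are empty
      have h1 : PySem.List.pyRange (min (s + len) (8*b0 + 8) - s) len 1 = [] := by
        apply pyRange_one_empty
        rw [hfd2] at hbl
        omega
      have h2 : PySem.List.pyRange (b0 + 1) (PySem.Int.floordiv (s + len - 1) 8 + 1) 1 = [] := by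
        apply pyRange_one_empty
        omega
      rw [h1, h2]
      simp
    · have hlt : b0 < PySem.Int.floordiv (s + len - 1) 8 := by omega
      have hnext : min (s + len) (8*b0 + 8) - s = max (8*(b0+1) - s) 0 := by
        rw [hfd2] at hlt
        rw [hfd1] at hfst
        omega
      rw [hnext]
      apply ih
      · rw [PySem.List.length_pySetD]; exact hlen'
      · omega
      · push_cast at hcnt ⊢; omega

-- ===== VERDICT (by name: the statement is the Claim_ definition above) =====
theorem set_bits_spec : Claim_equal_set_bits := by
  unfold Claim_equal_set_bits
  intro ba s l v _ hpre
  unfold Spec_set_bits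
  by_cases hl : 0 < l
  · obtain ⟨h1, h2⟩ := hpre hl
    rw [set_bits_eq]
    have halt : set_bits_alt ba s l v
        = (PySem.List.pyRange (PySem.Int.floordiv s 8)
            (PySem.Int.floordiv (s + l - 1) 8 + 1) 1).foldl
            (fun (arr : List Int) (b : Int) =>
              let lo := max s (8 * b)
              let hi := min (s + l) (8 * b + 8)
              let r := lo - 8 * b
              let w := hi - lo
              let chunk := PySem.Int.mod (v >>> (lo - s).toNat) ((1:Int) <<< w.toNat)
              let cur := PySem.List.pyGetD arr b 0
              PySem.List.pySetD arr b
                ((cur >>> (r + w).toNat <<< (r + w).toNat) + chunk * ((1:Int) <<< r.toNat)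
                  + PySem.Int.mod cur ((1:Int) <<< r.toNat)))
            ba := by
      unfold set_bits_alt
      rw [if_pos (by omega)]
    rw [halt]
    have hmax : max (8 * (PySem.Int.floordiv s 8) - s) 0 = 0 := by
      rw [PySem.Int.floordiv_eq_ediv_of_pos (by norm_num)]
      omega
    have hfle : PySem.Int.floordiv s 8 ≤ PySem.Int.floordiv (s + l - 1) 8 + 1 := by
      rw [PySem.Int.floordiv_eq_ediv_of_pos (by norm_num),
        PySem.Int.floordiv_eq_ediv_of_pos (by norm_num)]
      omega
    have h := outer_lemma s v l hl ba.length h1 h2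
      ((PySem.Int.floordiv (s + l - 1) 8 + 1 - PySem.Int.floordiv s 8).toNat)
      (PySem.Int.floordiv s 8) ba rfl (le_refl _) (by omega)
    rw [hmax] at h
    exact h
  · rw [set_bits_eq, pyRange_one_empty (by omega)]
    unfold set_bits_alt
    rw [if_neg (by omega)]
    rfl
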